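-- pv_equiv track=rewrite | github.com/soyeonvv/Algorithm | programmers/Lv2/148653.py | solution
-- ===== SOURCE A (Python) =====
-- def solution(storey):
--     answer = 0
--
--     while storey:
--         left = storey % 10
--         next = storey // 10 % 10
--
--         if left > 5:
--             answer += (10 - left)
--             storey += 10
--         elif left == 5:
--             answer += 5
--             storey += (10 if next >= 5 else 0)
--         else:
--             answer += left
--
--         storey //= 10
--
--     return answer
-- ===== SOURCE B (Python) =====
-- def solution(storey):
--     def go(n):
--         if n == 0:
--             return 0, 1  # (cost to make 0 exactly, cost to make 1)
--         a, b = go(n // 10)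
--         d = n % 10
--         return min(a + d, b + 10 - d), min(a + d + 1, b + 9 - d)
--     return go(storey)[0]
-- ===== Notes on version B (the rewrite author's own statement) =====
-- stated objective: simpler
-- what changed: Replaced A's single greedy pass that mutates storey in place (an in-place carry bump plus a lookahead at the next digit when the current digit is in the middle) by a two-state digit DP: a recursion on the quotient of storey keeping the pair (minimal presses to reach n exactly, minimal presses to reach n plus one) and combining the pair with min at each digit.
-- outside the precondition, e.g. on solution(-7): A returns 4, B raises RecursionError
import Mathlib
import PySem

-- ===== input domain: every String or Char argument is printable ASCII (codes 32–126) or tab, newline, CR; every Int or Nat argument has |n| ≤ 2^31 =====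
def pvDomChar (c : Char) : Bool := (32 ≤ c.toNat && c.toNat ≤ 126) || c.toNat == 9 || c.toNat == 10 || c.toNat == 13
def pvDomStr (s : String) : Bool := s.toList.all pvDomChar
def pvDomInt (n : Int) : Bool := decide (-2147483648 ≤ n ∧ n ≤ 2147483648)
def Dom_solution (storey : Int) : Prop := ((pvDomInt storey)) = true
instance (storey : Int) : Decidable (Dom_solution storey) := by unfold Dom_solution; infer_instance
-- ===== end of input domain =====

-- B replaces A's greedy pass that mutates storey in place (an in-place carry bump plus a
-- lookahead at the next digit on a middle digit) by a two-state digit DP recursing on the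
-- quotient of storey: objective 'simpler', same O(number of digits) cost.

-- ===== PORT A =====
-- while storey: ... — one recursive call per loop iteration.  The Nat argument is fuel that
-- only makes the recursion total: |storey| + 2 never runs out (loop_master below proves the
-- value is fuel-independent on 0 ≤ storey).
def solution.loop : Nat → Int → Int → Int
  | 0, _, answer => answer
  | fuel + 1, storey, answer =>
    if storey = 0 then answer
    else
      let left := PySem.Int.mod storey 10
      let next := PySem.Int.mod (PySem.Int.floordiv storey 10) 10
      if left > 5 then
        -- answer += (10 - left); storey += 10; storey //= 10
        solution.loop fuel (PySem.Int.floordiv (storey + 10) 10) (answer + (10 - left))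
      else if left = 5 then
        -- answer += 5; storey += (10 if next >= 5 else 0); storey //= 10
        solution.loop fuel (PySem.Int.floordiv (storey + (if next ≥ 5 then 10 else 0)) 10) (answer + 5)
      else
        -- answer += left; storey //= 10
        solution.loop fuel (PySem.Int.floordiv storey 10) (answer + left)

def solution (storey : Int) : Int := solution.loop (storey.natAbs + 2) storey 0

-- ===== PORT B =====
-- go(n) = (min presses to reach exactly n, min presses to reach n + 1), recursing on n // 10.
-- The Nat argument is fuel for totality only: |n| + 1 suffices on 0 ≤ n (go_master below);
-- on n < 0 the Python recursion does not terminate (outside Pre_solution).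
def solution_alt.go : Nat → Int → Int × Int
  | 0, _ => (0, 1)
  | fuel + 1, n =>
    if n = 0 then (0, 1)
    else
      let p := solution_alt.go fuel (PySem.Int.floordiv n 10)
      let d := PySem.Int.mod n 10
      (min (p.1 + d) (p.2 + 10 - d), min (p.1 + d + 1) (p.2 + 9 - d))

def solution_alt (storey : Int) : Int := (solution_alt.go (storey.natAbs + 1) storey).1

-- ===== PRECONDITION & SPEC =====
-- Pre_ excludes negative storey, which is not a floor number: B's natural recursion does not
-- terminate there (Python B raises RecursionError), so no return value is claimed on it,
-- while A still returns a value (see the cite in claim.json).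
def Pre_solution (storey : Int) : Prop := 0 ≤ storey
instance (storey : Int) : Decidable (Pre_solution storey) := by unfold Pre_solution; infer_instance
def pvWitness_solution : Int := (95)

def Spec_solution (storey : Int) (out : Int) : Prop := out = solution_alt storey
instance (storey : Int) (out : Int) : Decidable (Spec_solution storey out) := by unfold Spec_solution; infer_instance

-- ===== CLAIM (what is proved, stated in full; the proofs are below) =====
def Claim_equal_solution : Prop := ∀ (storey : Int), Dom_solution storey → Pre_solution storey → Spec_solution storey (solution storey)

-- ===== LEMMAS AND PROOFS =====

-- A's loop run with its own fuel from a zero accumulator.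
def pvG (s : Int) : Int := solution.loop (s.natAbs + 2) s 0

-- Fuel irrelevance + accumulator: any sufficient fuel computes a + pvG s.
lemma loop_master : ∀ (k f : Nat) (s a : Int), 0 ≤ s → s.toNat ≤ k → s.toNat < f →
    solution.loop f s a = a + pvG s := by
  intro k
  induction k with
  | zero =>
    intro f s a hs hk hf
    have h0 : s = 0 := by omega
    subst h0
    obtain ⟨f', rfl⟩ : ∃ f', f = f' + 1 := ⟨f - 1, by omega⟩
    simp [solution.loop, pvG]
  | succ k ih =>
    intro f s a hs hk hf
    obtain ⟨f', rfl⟩ : ∃ f', f = f' + 1 := ⟨f - 1, by omega⟩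
    by_cases h0 : s = 0
    · subst h0; simp [solution.loop, pvG]
    · conv_rhs => rw [pvG]
      rw [show s.natAbs + 2 = (s.natAbs + 1) + 1 from rfl]
      rw [solution.loop, solution.loop]
      simp only [if_neg h0,
        PySem.Int.floordiv_eq_ediv_of_pos (by norm_num : (0:Int) < 10),
        PySem.Int.mod_eq_emod_of_pos (by norm_num : (0:Int) < 10)]
      split_ifs with h1 h2 h3
      · rw [ih f' _ _ (by omega) (by omega) (by omega),
          ih (s.natAbs + 1) _ _ (by omega) (by omega) (by omega)]
        ring
      · rw [ih f' _ _ (by omega) (by omega) (by omega),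
          ih (s.natAbs + 1) _ _ (by omega) (by omega) (by omega)]
        ring
      · rw [ih f' _ _ (by omega) (by omega) (by omega),
          ih (s.natAbs + 1) _ _ (by omega) (by omega) (by omega)]
        ring
      · rw [ih f' _ _ (by omega) (by omega) (by omega),
          ih (s.natAbs + 1) _ _ (by omega) (by omega) (by omega)]
        ring

-- One unfolding of pvG for positive s, written with Int.ediv / Int.emod.
lemma pvG_step (s : Int) (hs : 0 < s) :
    pvG s = if s % 10 > 5 then (10 - s % 10) + pvG (s / 10 + 1)
      else if s % 10 = 5 then 5 + (if (s / 10) % 10 ≥ 5 then pvG (s / 10 + 1) else pvG (s / 10))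
      else s % 10 + pvG (s / 10) := by
  have h0 : ¬ s = 0 := by omega
  conv_lhs => rw [pvG]
  rw [show s.natAbs + 2 = (s.natAbs + 1) + 1 from rfl]
  rw [solution.loop]
  simp only [if_neg h0,
    PySem.Int.floordiv_eq_ediv_of_pos (by norm_num : (0:Int) < 10),
    PySem.Int.mod_eq_emod_of_pos (by norm_num : (0:Int) < 10)]
  split_ifs with h1 h2 h3
  · rw [show (s + 10) / 10 = s / 10 + 1 by omega,
      loop_master (s / 10 + 1).toNat (s.natAbs + 1) _ _ (by omega) le_rfl (by omega)]
    ring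
  · rw [show (s + 10) / 10 = s / 10 + 1 by omega,
      loop_master (s / 10 + 1).toNat (s.natAbs + 1) _ _ (by omega) le_rfl (by omega)]
    ring
  · rw [show (s + 0) / 10 = s / 10 by omega,
      loop_master (s / 10).toNat (s.natAbs + 1) _ _ (by omega) le_rfl (by omega)]
    ring
  · rw [loop_master (s / 10).toNat (s.natAbs + 1) _ _ (by omega) le_rfl (by omega)]
    ring

lemma pvG_zero : pvG 0 = 0 := rfl

lemma pvG_one : pvG 1 = 1 := by
  rw [pvG_step 1 one_pos]
  norm_num [pvG_zero]

-- How one extra press changes A's answer: the step is 0 or ±1, with the sign governed by the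
-- last digit (≥ 5 rounds up).
lemma pvG_succ : ∀ (k : Nat) (n : Int), 0 ≤ n → n.toNat ≤ k →
    (pvG (n + 1) ≤ pvG n + 1) ∧ (pvG n ≤ pvG (n + 1) + 1) ∧
    (n % 10 < 5 → pvG n ≤ pvG (n + 1)) ∧ (5 ≤ n % 10 → pvG (n + 1) ≤ pvG n) := by
  intro k
  induction k with
  | zero =>
    intro n hn hk
    have h0 : n = 0 := by omega
    subst h0
    rw [show (0:Int) + 1 = 1 by norm_num, pvG_zero, pvG_one]
    omega
  | succ k ih =>
    intro n hn hk
    by_cases h0 : n = 0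
    · subst h0; rw [show (0:Int) + 1 = 1 by norm_num, pvG_zero, pvG_one]; omega
    · have hpos : 0 < n := by omega
      obtain ⟨E1, E2, E3, E4⟩ := ih (n / 10) (by omega) (by omega)
      have E5 : (pvG (n / 10) ≤ pvG (n / 10 + 1) ∧ (n / 10) % 10 < 5) ∨
          (pvG (n / 10 + 1) ≤ pvG (n / 10) ∧ 5 ≤ (n / 10) % 10) := by
        rcases le_or_gt 5 ((n / 10) % 10) with h | h
        · exact Or.inr ⟨E4 h, h⟩
        · exact Or.inl ⟨E3 h, h⟩
      by_cases h9 : n % 10 = 9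
      · rw [pvG_step n hpos, pvG_step (n + 1) (by omega),
          show (n + 1) % 10 = 0 by omega, show (n + 1) / 10 = n / 10 + 1 by omega]
        split_ifs <;> omega
      · rw [pvG_step n hpos, pvG_step (n + 1) (by omega),
          show (n + 1) % 10 = n % 10 + 1 by omega, show (n + 1) / 10 = n / 10 by omega]
        split_ifs <;> omega

-- B's DP run with its own fuel.
def pvGo (n : Int) : Int × Int := solution_alt.go (n.natAbs + 1) n

-- Fuel irrelevance for B.
lemma go_master : ∀ (k f : Nat) (n : Int), 0 ≤ n → n.toNat ≤ k → n.toNat < f →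
    solution_alt.go f n = pvGo n := by
  intro k
  induction k with
  | zero =>
    intro f n hn hk hf
    have h0 : n = 0 := by omega
    subst h0
    obtain ⟨f', rfl⟩ : ∃ f', f = f' + 1 := ⟨f - 1, by omega⟩
    simp [solution_alt.go, pvGo]
  | succ k ih =>
    intro f n hn hk hf
    obtain ⟨f', rfl⟩ : ∃ f', f = f' + 1 := ⟨f - 1, by omega⟩
    by_cases h0 : n = 0
    · subst h0; simp [solution_alt.go, pvGo]
    · conv_rhs => rw [pvGo]
      rw [solution_alt.go, solution_alt.go]
      simp only [if_neg h0,
        PySem.Int.floordiv_eq_ediv_of_pos (by norm_num : (0:Int) < 10)]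
      rw [ih f' _ (by omega) (by omega) (by omega),
        ih n.natAbs _ (by omega) (by omega) (by omega)]

-- B's DP state is exactly (A's answer for n, A's answer for n + 1).
lemma go_eq : ∀ (k : Nat) (n : Int), 0 ≤ n → n.toNat ≤ k →
    pvGo n = (pvG n, pvG (n + 1)) := by
  intro k
  induction k with
  | zero =>
    intro n hn hk
    have h0 : n = 0 := by omega
    subst h0
    rw [show (0:Int) + 1 = 1 by norm_num, pvG_zero, pvG_one]
    rfl
  | succ k ih =>
    intro n hn hk
    by_cases h0 : n = 0
    · subst h0; rw [show (0:Int) + 1 = 1 by norm_num, pvG_zero, pvG_one]; rfl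
    · have hpos : 0 < n := by omega
      rw [pvGo, solution_alt.go]
      simp only [if_neg h0,
        PySem.Int.floordiv_eq_ediv_of_pos (by norm_num : (0:Int) < 10),
        PySem.Int.mod_eq_emod_of_pos (by norm_num : (0:Int) < 10)]
      rw [go_master (n / 10).toNat n.natAbs _ (by omega) le_rfl (by omega)]
      rw [ih (n / 10) (by omega) (by omega)]
      obtain ⟨E1, E2, E3, E4⟩ := pvG_succ (n / 10).toNat (n / 10) (by omega) le_rfl
      have E5 : (pvG (n / 10) ≤ pvG (n / 10 + 1) ∧ (n / 10) % 10 < 5) ∨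
          (pvG (n / 10 + 1) ≤ pvG (n / 10) ∧ 5 ≤ (n / 10) % 10) := by
        rcases le_or_gt 5 ((n / 10) % 10) with h | h
        · exact Or.inr ⟨E4 h, h⟩
        · exact Or.inl ⟨E3 h, h⟩
      simp only [Prod.mk.injEq]
      by_cases h9 : n % 10 = 9
      · rw [pvG_step n hpos, pvG_step (n + 1) (by omega),
          show (n + 1) % 10 = 0 by omega, show (n + 1) / 10 = n / 10 + 1 by omega]
        constructor <;> (split_ifs <;> omega)
      · rw [pvG_step n hpos, pvG_step (n + 1) (by omega),
          show (n + 1) % 10 = n % 10 + 1 by omega, show (n + 1) / 10 = n / 10 by omega]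
        constructor <;> (split_ifs <;> omega)

-- ===== VERDICT (by name: the statement is the Claim_ definition above) =====
theorem solution_spec : Claim_equal_solution := by
  intro s _ hpre
  show solution s = solution_alt s
  have h1 := loop_master s.toNat (s.natAbs + 2) s 0 hpre le_rfl (by omega)
  have h2 := go_master s.toNat (s.natAbs + 1) s hpre le_rfl (by omega)
  have h3 := go_eq s.toNat s hpre le_rfl
  show solution.loop (s.natAbs + 2) s 0 = (solution_alt.go (s.natAbs + 1) s).1
  rw [h1, h2, h3]
  ring
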